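-- pv_equiv track=rewrite | github.com/DIG-Network/proof_research | sub-problems/verifier-oracle-model/experiments/adaptive-coordinate-or-rsparse-xor-tree-depth-wt-four-five-n9/script.py | build_coord_partition_masks
-- ===== SOURCE A (Python) =====
-- N = 9
--
-- def build_coord_partition_masks(masks: list[int]) -> list[tuple[int, int]]:
--     out: list[tuple[int, int]] = []
--     for i in range(N):
--         b0 = 0
--         b1 = 0
--         for k, m in enumerate(masks):
--             if (m >> i) & 1:
--                 b1 |= 1 << k
--             else:
--                 b0 |= 1 << k
--         out.append((b0, b1))
--     return out
-- ===== SOURCE B (Python) =====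
-- N = 9
--
-- def build_coord_partition_masks(masks: list[int]) -> list[tuple[int, int]]:
--     # Single pass over masks: distribute each mask's bit (a disjoint one-hot 1 << k)
--     # into nine running b1 totals, then derive each b0 as the complement of b1.
--     b1 = [0] * N
--     for k, m in enumerate(masks):
--         bit = 1 << k
--         b1 = [v + bit if (m >> i) & 1 else v for i, v in enumerate(b1)]
--     full = (1 << len(masks)) - 1
--     return [(full ^ v, v) for v in b1]
-- ===== Notes on version B (the rewrite author's own statement) =====
-- stated objective: alternative
-- what changed: Transposed traversal: a single pass over masks updates nine running b1 totals by adding disjoint one-hot bits, and each b0 is derived at the end as the complement full ^ b1 with full = (1<<len(masks))-1, instead of A's nine separate passes each maintaining two OR-accumulators with an if/else.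
import Mathlib
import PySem

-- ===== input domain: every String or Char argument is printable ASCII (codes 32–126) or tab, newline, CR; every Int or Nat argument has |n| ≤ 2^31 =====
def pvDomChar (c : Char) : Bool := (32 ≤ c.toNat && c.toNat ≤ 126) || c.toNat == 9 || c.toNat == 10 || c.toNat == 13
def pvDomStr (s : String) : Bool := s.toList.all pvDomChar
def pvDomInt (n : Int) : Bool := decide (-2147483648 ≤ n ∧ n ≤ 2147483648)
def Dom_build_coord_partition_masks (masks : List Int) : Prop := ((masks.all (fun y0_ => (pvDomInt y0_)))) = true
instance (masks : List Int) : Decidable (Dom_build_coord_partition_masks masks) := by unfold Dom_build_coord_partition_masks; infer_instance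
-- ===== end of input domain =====

-- B transposes the traversal: one pass over the masks distributes each mask's disjoint
-- one-hot bit 1 << k into nine running b1 totals, and b0 is derived at the end as the
-- complement full ^ b1, instead of A's nine passes with two OR-accumulators; objective: alternative.

-- ===== PORT A =====
-- inner loop body of A: if (m >> i) & 1: b1 |= 1 << k else: b0 |= 1 << k
-- (k comes from enumerate and is a nonnegative Int, so k.toNat is exact for Python's 1 << k)
def bcpStepA (i : Nat) (p : Int × Int) (km : Int × Int) : Int × Int :=
  if PySem.Int.band (km.2 >>> i) 1 ≠ 0 then (p.1, PySem.Int.bor p.2 ((1:Int) <<< km.1.toNat))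
  else (PySem.Int.bor p.1 ((1:Int) <<< km.1.toNat), p.2)

def build_coord_partition_masks (masks : List Int) : List (Int × Int) :=
  (PySem.List.pyRange 0 9 1).foldl
    (fun out i => out ++ [(PySem.List.enumerate masks 0).foldl (bcpStepA i.toNat) (0, 0)])
    []

-- ===== PORT B =====
-- body of B's per-mask update: b1 = [v + bit if (m >> i) & 1 else v for i, v in enumerate(b1)]
def bAltStep (km : Int × Int) (arr : List Int) : List Int :=
  (PySem.List.enumerate arr 0).map
    (fun iv => if PySem.Int.band (km.2 >>> iv.1.toNat) 1 ≠ 0 then iv.2 + ((1:Int) <<< km.1.toNat) else iv.2)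

def build_coord_partition_masks_alt (masks : List Int) : List (Int × Int) :=
  let b1 := (PySem.List.enumerate masks 0).foldl (fun arr km => bAltStep km arr) (List.replicate 9 0)
  let full : Int := ((1:Int) <<< masks.length) - 1
  b1.map (fun v => (PySem.Int.bxor full v, v))

-- ===== PRECONDITION & SPEC =====
def Spec_build_coord_partition_masks (masks : List Int) (out : List (Int × Int)) : Prop := out = build_coord_partition_masks_alt masks
instance (masks : List Int) (out : List (Int × Int)) : Decidable (Spec_build_coord_partition_masks masks out) := by unfold Spec_build_coord_partition_masks; infer_instance

-- ===== CLAIM (what is proved, stated in full; the proofs are below) =====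
def Claim_equal_build_coord_partition_masks : Prop := ∀ (masks : List Int), Dom_build_coord_partition_masks masks → Spec_build_coord_partition_masks masks (build_coord_partition_masks masks)

-- ===== LEMMAS AND PROOFS =====

-- column-wise additive fold (proof device): the contribution of the masks to position i
def colStep (i : Nat) (s : Int) (km : Int × Int) : Int :=
  if PySem.Int.band (km.2 >>> i) 1 ≠ 0 then s + ((1:Int) <<< km.1.toNat) else s

-- a ||| 2^k = a + 2^k for a < 2^k (Nat)
lemma nat_lor_two_pow (k : Nat) : ∀ a : Nat, a < 2 ^ k → a ||| 2 ^ k = a + 2 ^ k := by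
  induction k with
  | zero => intro a ha; interval_cases a; decide
  | succ k ih =>
    intro a ha
    have hb := Nat.bit_testBit_zero_shiftRight_one a
    have hq2 : a >>> 1 = a / 2 := Nat.shiftRight_one a
    have hp : (2:Nat) ^ (k + 1) = 2 * 2 ^ k := by ring
    have hqlt : a >>> 1 < 2 ^ k := by omega
    have h2 : (2:Nat) ^ (k + 1) = Nat.bit false (2 ^ k) := by
      rw [Nat.bit_val]; simp [hp]
    have hb' : 2 * (a >>> 1) + (a.testBit 0).toNat = a := by rw [← Nat.bit_val, hb]
    conv_lhs => rw [← hb, h2]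
    rw [Nat.lor_bit, Bool.or_false, ih _ hqlt, Nat.bit_val]
    cases hT : a.testBit 0 <;> rw [hT] at hb' <;>
      simp only [Bool.toNat_false, Bool.toNat_true] at hb' ⊢ <;> omega

-- (2^n - 1) ^^^ s = 2^n - 1 - s for s < 2^n (Nat)
lemma nat_xor_mersenne (n : Nat) : ∀ s : Nat, s < 2 ^ n → (2 ^ n - 1) ^^^ s = 2 ^ n - 1 - s := by
  induction n with
  | zero => intro s hs; interval_cases s; decide
  | succ n ih =>
    intro s hs
    have hb := Nat.bit_testBit_zero_shiftRight_one s
    have hq2 : s >>> 1 = s / 2 := Nat.shiftRight_one s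
    have hp : (2:Nat) ^ (n + 1) = 2 * 2 ^ n := by ring
    have h0 : (0:Nat) < 2 ^ n := Nat.two_pow_pos n
    have hqlt : s >>> 1 < 2 ^ n := by omega
    have hm : (2:Nat) ^ (n + 1) - 1 = Nat.bit true (2 ^ n - 1) := by
      rw [Nat.bit_val]; simp only [Bool.toNat_true]; omega
    have hb' : 2 * (s >>> 1) + (s.testBit 0).toNat = s := by rw [← Nat.bit_val, hb]
    conv_lhs => rw [← hb, hm]
    rw [Nat.xor_bit, ih _ hqlt, Nat.bit_val]
    cases hT : s.testBit 0 <;> rw [hT] at hb' <;>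
      simp only [Bool.toNat_false, Bool.toNat_true, bne_self_eq_false, Bool.bne_false,
        Bool.toNat_true] at hb' ⊢ <;> omega

-- Int versions on nonneg arguments
lemma int_bor_two_pow (b : Int) (k : Nat) (h0 : 0 ≤ b) (h1 : b < 2 ^ k) :
    PySem.Int.bor b ((2:Int) ^ k) = b + 2 ^ k := by
  have hb : b = (b.toNat : Int) := (Int.toNat_of_nonneg h0).symm
  have hc : ((2:Int) ^ k) = ((2 ^ k : Nat) : Int) := by push_cast; ring
  have hlt : b.toNat < 2 ^ k := by omega
  rw [hb, hc, PySem.Int.bor_natCast, nat_lor_two_pow k _ hlt]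
  push_cast; ring

lemma int_bxor_mersenne (n : Nat) (s : Int) (h0 : 0 ≤ s) (hs : s ≤ 2 ^ n - 1) :
    PySem.Int.bxor ((2:Int) ^ n - 1) s = 2 ^ n - 1 - s := by
  have hc : ((2:Int) ^ n) = ((2 ^ n : Nat) : Int) := by push_cast; ring
  have h1 : (1:Nat) ≤ 2 ^ n := Nat.one_le_two_pow
  have hm : ((2:Int) ^ n - 1) = ((2 ^ n - 1 : Nat) : Int) := by push_cast [h1]; ring
  have hsN : s = (s.toNat : Int) := (Int.toNat_of_nonneg h0).symm
  have hlt : s.toNat < 2 ^ n := by omega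
  have hle : s.toNat ≤ 2 ^ n - 1 := by omega
  rw [hm, hsN, PySem.Int.bxor_natCast, nat_xor_mersenne n _ hlt]
  push_cast [h1, hle]; ring

-- the column fold shifts with its accumulator
lemma colFold_shift (i : Nat) : ∀ (l : List (Int × Int)) (s : Int),
    l.foldl (colStep i) s = s + l.foldl (colStep i) 0 := by
  intro l
  induction l with
  | nil => intro s; simp
  | cons km tl ih =>
    intro s
    simp only [List.foldl_cons, colStep]
    split_ifs with h
    · rw [ih, ih ((0:Int) + _)]; ring
    · exact ih s

-- bounds on the column fold over enumerate ms k
lemma colFold_bounds (i : Nat) : ∀ (ms : List Int) (k : Nat),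
    0 ≤ (PySem.List.enumerate ms (k : Int)).foldl (colStep i) 0 ∧
    (PySem.List.enumerate ms (k : Int)).foldl (colStep i) 0 ≤ ((2:Int) ^ ms.length - 1) * 2 ^ k := by
  intro ms
  induction ms with
  | nil => intro k; simp [PySem.List.enumerate_nil]
  | cons m tl ih =>
    intro k
    have hpk : (0:Int) < 2 ^ k := by positivity
    have hpl : (0:Int) < 2 ^ tl.length := by positivity
    have hcast : ((k : Int) + 1) = ((k + 1 : Nat) : Int) := by push_cast; ring
    have hsh : ((1:Int) <<< ((k : Int)).toNat) = 2 ^ k := by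
      rw [Int.toNat_natCast, Int.shiftLeft_eq]; ring
    have hkey : ((2:Int) ^ (tl.length + 1) - 1) * 2 ^ k
        = 2 ^ k + ((2:Int) ^ tl.length - 1) * (2 ^ (k + 1)) := by ring
    obtain ⟨hl, hr⟩ := ih (k + 1)
    simp only [PySem.List.enumerate_cons, List.foldl_cons, colStep, hcast, hsh, List.length_cons]
    split_ifs with h
    · rw [colFold_shift]
      constructor
      · linarith
      · rw [hkey]; linarith
    · constructor
      · exact hl
      · rw [hkey]; nlinarith

-- A's inner loop in terms of the column fold
lemma inner_eq (i : Nat) : ∀ (ms : List Int) (k : Nat) (b0 b1 : Int),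
    0 ≤ b0 → b0 < 2 ^ k → 0 ≤ b1 → b1 < 2 ^ k →
    (PySem.List.enumerate ms (k : Int)).foldl (bcpStepA i) (b0, b1)
      = (b0 + ((2:Int) ^ ms.length - 1) * 2 ^ k - (PySem.List.enumerate ms (k : Int)).foldl (colStep i) 0,
         b1 + (PySem.List.enumerate ms (k : Int)).foldl (colStep i) 0) := by
  intro ms
  induction ms with
  | nil => intro k b0 b1 _ _ _ _; simp [PySem.List.enumerate_nil]
  | cons m tl ih =>
    intro k b0 b1 h00 h01 h10 h11
    have hpk : (0:Int) < 2 ^ k := by positivity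
    have hcast : ((k : Int) + 1) = ((k + 1 : Nat) : Int) := by push_cast; ring
    have hsh : ((1:Int) <<< ((k : Int)).toNat) = 2 ^ k := by
      rw [Int.toNat_natCast, Int.shiftLeft_eq]; ring
    have hk1 : ((2:Int) ^ (k + 1)) = 2 * 2 ^ k := by ring
    simp only [PySem.List.enumerate_cons, List.foldl_cons, bcpStepA, colStep, hcast, hsh,
      List.length_cons]
    split_ifs with h
    · rw [int_bor_two_pow b1 k h10 h11,
        ih (k+1) b0 (b1 + 2 ^ k) h00 (by omega) (by omega) (by rw [hk1] at *; omega),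
        colFold_shift i _ ((0:Int) + 2 ^ k)]
      rw [Prod.mk.injEq]; exact ⟨by ring, by ring⟩
    · rw [int_bor_two_pow b0 k h00 h01,
        ih (k+1) (b0 + 2 ^ k) b1 (by omega) (by rw [hk1] at *; omega) h10 (by omega)]
      rw [Prod.mk.injEq]; exact ⟨by ring, by ring⟩

-- per-position value of A's inner loop
lemma per_i (masks : List Int) (i : Nat) :
    (PySem.List.enumerate masks 0).foldl (bcpStepA i) (0, 0)
      = (PySem.Int.bxor (((1:Int) <<< masks.length) - 1)
           ((PySem.List.enumerate masks 0).foldl (colStep i) 0),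
         (PySem.List.enumerate masks 0).foldl (colStep i) 0) := by
  have h0 : (((0:Nat)) : Int) = 0 := by norm_num
  have hfull : ((1:Int) <<< masks.length) = 2 ^ masks.length := by
    rw [Int.shiftLeft_eq]; ring
  have hmain := inner_eq i masks 0 0 0 (le_refl 0) (by norm_num) (le_refl 0) (by norm_num)
  obtain ⟨hl, hr⟩ := colFold_bounds i masks 0
  rw [h0] at hmain hl hr
  rw [hmain, hfull,
    int_bxor_mersenne masks.length _ hl (by simpa using hr)]
  rw [Prod.mk.injEq]; exact ⟨by ring, by ring⟩

-- enumerate of a map over an enumerate keeps the indices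
lemma enum_map_enum {α β : Type} (g : Int → α → β) : ∀ (arr : List α) (s : Int),
    PySem.List.enumerate ((PySem.List.enumerate arr s).map (fun iv => g iv.1 iv.2)) s
      = (PySem.List.enumerate arr s).map (fun iv => (iv.1, g iv.1 iv.2)) := by
  intro arr
  induction arr with
  | nil => intro s; simp [PySem.List.enumerate_nil]
  | cons a tl ih => intro s; simp [PySem.List.enumerate_cons, ih]

-- B's transposed fold computes, entry-wise, the column folds
lemma transpose_eq (ms : List Int) : ∀ (k : Nat) (arr : List Int),
    (PySem.List.enumerate ms (k : Int)).foldl (fun a km => bAltStep km a) arr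
      = (PySem.List.enumerate arr 0).map
          (fun iv => iv.2 + (PySem.List.enumerate ms (k : Int)).foldl (colStep iv.1.toNat) 0) := by
  induction ms with
  | nil =>
    intro k arr
    simp only [PySem.List.enumerate_nil, List.foldl_nil]
    simp only [add_zero]
    exact (PySem.List.map_snd_enumerate arr 0).symm
  | cons m tl ih =>
    intro k arr
    have hcast : ((k : Int) + 1) = ((k + 1 : Nat) : Int) := by push_cast; ring
    simp only [PySem.List.enumerate_cons, List.foldl_cons, hcast]
    have hstep : bAltStep ((k : Int), m) arr
        = (PySem.List.enumerate arr 0).map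
            (fun iv => (fun (j : Int) (v : Int) =>
              if PySem.Int.band (m >>> j.toNat) 1 ≠ 0 then v + ((1:Int) <<< ((k:Int)).toNat) else v)
              iv.1 iv.2) := by simp only [bAltStep, Int.shiftRight_natCast_right]
    rw [hstep, ih (k + 1),
      enum_map_enum (fun (j : Int) (v : Int) =>
        if PySem.Int.band (m >>> j.toNat) 1 ≠ 0 then v + ((1:Int) <<< ((k:Int)).toNat) else v) arr 0,
      List.map_map]
    apply List.map_congr_left
    intro iv _
    rw [colFold_shift iv.1.toNat (PySem.List.enumerate tl (((k + 1 : Nat)) : Int))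
      (colStep iv.1.toNat 0 ((k:Int), m))]
    have hseed : colStep iv.1.toNat 0 ((k:Int), m)
        = if PySem.Int.band (m >>> iv.1.toNat) 1 ≠ 0 then ((1:Int) <<< ((k:Int)).toNat) else 0 := by
      simp only [colStep]; split_ifs <;> ring
    rw [hseed]
    simp only [Function.comp]
    split_ifs with h <;> ring

-- ===== VERDICT (by name: the statement is the Claim_ definition above) =====
theorem build_coord_partition_masks_spec : Claim_equal_build_coord_partition_masks := by
  intro masks _
  unfold Spec_build_coord_partition_masks build_coord_partition_masks build_coord_partition_masks_alt
  have hb1 := transpose_eq masks 0 (List.replicate 9 0)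
  rw [show (((0:Nat)) : Int) = 0 from rfl] at hb1
  rw [hb1,
    show PySem.List.enumerate (List.replicate 9 (0:Int)) 0
      = [(0,0),(1,0),(2,0),(3,0),(4,0),(5,0),(6,0),(7,0),(8,0)] from by decide,
    show PySem.List.pyRange 0 9 1 = [0,1,2,3,4,5,6,7,8] from by decide]
  simp only [List.foldl_cons, List.foldl_nil, List.map_cons, List.map_nil, List.nil_append,
    List.cons_append]
  norm_num [per_i]
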